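-- pv_equiv track=rewrite | github.com/FractalPulv/eindhoven-event-adder | scraper_service.py | get_image_url_from_srcset
-- ===== SOURCE A (Python) =====
-- BASE_URL = "https://www.thisiseindhoven.com"
--
-- def get_image_url_from_srcset(srcset):
--     """Picks a reasonable image URL from srcset, preferring larger ones or a default."""
--     if not srcset:
--         return None
--     # Split srcset into individual url-descriptor pairs
--     sources = [s.strip().split(' ') for s in srcset.split(',')]
--     # Example: [['/url1.jpg?width=720&resizemode=force', '720w'], ['/url2.jpg?width=638&resizemode=force', '638w']]
--
--     best_url = None
--     max_width = 0
--
--     for parts in sources: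
--         url = parts[0]
--         descriptor = parts[-1] # Last part is usually the descriptor like '720w' or '2x'
--
--         if descriptor.endswith('w'):
--             try:
--                 width = int(descriptor[:-1])
--                 if width > max_width:
--                     max_width = width
--                     best_url = url
--             except ValueError:
--                 pass # Not a width descriptor or malformed
--         elif not best_url: # Take the first one if no width descriptors are clear
--             best_url = url
--
--     return BASE_URL + best_url if best_url else None
-- ===== SOURCE B (Python) =====
-- BASE_URL = "https://www.thisiseindhoven.com"
--
-- def get_image_url_from_srcset(srcset):
--     """Staged sort-then-pick: rank parseable width candidates by width (stable, descending)
--     and take the head; else first usable non-width entry."""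
--     if not srcset:
--         return None
--     entries = [s.strip().split(' ') for s in srcset.split(',')]
--     widths = []
--     for parts in entries:
--         d = parts[-1]
--         if d.endswith('w'):
--             try:
--                 w = int(d[:-1])
--             except ValueError:
--                 continue
--             if w > 0:
--                 widths.append((w, parts[0]))
--     ranked = sorted(widths, key=lambda p: p[0], reverse=True)
--     if ranked:
--         best = ranked[0][1]
--     else:
--         best = next((p[0] for p in entries
--                      if not p[-1].endswith('w') and p[0]), None)
--     return BASE_URL + best if best else None
-- ===== Notes on version B (the rewrite author's own statement) =====
-- stated objective: alternative
-- what changed: Replaces A's single stateful running-max fold (best_url/max_width with an interleaved fallback branch) by a staged sort-then-pick: collect (width,url) candidates, stable-sort them by width descending and take the head (ties keep the earliest, matching A's strict '>'), else pick the first usable non-width entry with next().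
import Mathlib
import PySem

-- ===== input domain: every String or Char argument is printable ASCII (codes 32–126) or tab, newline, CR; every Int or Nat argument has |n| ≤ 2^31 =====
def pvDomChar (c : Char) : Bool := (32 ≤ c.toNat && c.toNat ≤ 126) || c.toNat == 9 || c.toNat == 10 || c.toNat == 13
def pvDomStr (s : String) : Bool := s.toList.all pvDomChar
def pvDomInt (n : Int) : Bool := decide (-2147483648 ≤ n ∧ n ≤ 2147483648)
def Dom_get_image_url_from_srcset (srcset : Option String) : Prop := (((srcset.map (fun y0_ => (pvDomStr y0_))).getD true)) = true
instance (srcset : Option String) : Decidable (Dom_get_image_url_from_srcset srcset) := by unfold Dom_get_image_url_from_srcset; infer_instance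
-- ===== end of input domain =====

-- B replaces A's single stateful running-max loop (with interleaved fallback) by a staged
-- sort-then-pick selection: stable sort of the (width,url) candidates by width descending,
-- take the head; else the first usable fallback entry. Same return value.

-- ===== PORT A =====
def pvBase : String := "https://www.thisiseindhoven.com"

-- one iteration of A's for-loop; `parts` is never [] (split always yields a piece), so the `.getD ""` defaults are unreachable
def pvStepA (st : Option String × Int) (parts : List String) : Option String × Int :=
  let url := (PySem.List.pyGet? parts 0).getD ""
  let descriptor := (PySem.List.pyGet? parts (-1)).getD ""
  if PySem.Str.endswith descriptor "w" then
    match PySem.Int.ofStr? (PySem.Str.slice descriptor none (some (-1))) with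
    | some width => if st.2 < width then (some url, width) else st
    | none => st
  else if st.1 = none ∨ st.1 = some "" then (some url, st.2) else st

def get_image_url_from_srcset (srcset : Option String) : Option String :=
  match srcset with
  | none => none
  | some s =>
    if s = "" then none else
    -- s.split(','), e.strip().split(' '): the separators are non-empty, so split? is always `some`
    let sources := ((PySem.Str.split? s ",").getD []).map
      (fun e => (PySem.Str.split? (PySem.Str.strip e) " ").getD [])
    let r := sources.foldl pvStepA (none, 0)
    match r.1 with
    | some u => if u = "" then none else some (pvBase ++ u)
    | none => none

-- ===== PORT B =====
-- candidate of B's collection pass: (width, url) for a parseable positive 'w' descriptor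
def pvWidthOf (parts : List String) : Option (Int × String) :=
  let d := (PySem.List.pyGet? parts (-1)).getD ""
  if PySem.Str.endswith d "w" then
    match PySem.Int.ofStr? (PySem.Str.slice d none (some (-1))) with
    | some w => if 0 < w then some (w, (PySem.List.pyGet? parts 0).getD "") else none
    | none => none
  else none

-- B's fallback predicate: non-width descriptor with a non-empty url
def pvFallback (parts : List String) : Bool :=
  !(PySem.Str.endswith ((PySem.List.pyGet? parts (-1)).getD "") "w")
    && ((PySem.List.pyGet? parts 0).getD "" != "")

def get_image_url_from_srcset_alt (srcset : Option String) : Option String :=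
  match srcset with
  | none => none
  | some s =>
    if s = "" then none else
    let entries := ((PySem.Str.split? s ",").getD []).map
      (fun e => (PySem.Str.split? (PySem.Str.strip e) " ").getD [])
    let widths := entries.filterMap pvWidthOf
    -- sorted(widths, key=lambda p: p[0], reverse=True): stable, descending by width
    let ranked := PySem.List.sorted widths (fun p => p.1) true
    let best : Option String :=
      match ranked with
      | p :: _ => some p.2
      | [] => (entries.find? pvFallback).map (fun parts => (PySem.List.pyGet? parts 0).getD "")
    match best with
    | some u => if u = "" then none else some (pvBase ++ u)
    | none => none

-- ===== PRECONDITION & SPEC =====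
def Spec_get_image_url_from_srcset (srcset : Option String) (out : Option String) : Prop := out = get_image_url_from_srcset_alt srcset
instance (srcset : Option String) (out : Option String) : Decidable (Spec_get_image_url_from_srcset srcset out) := by unfold Spec_get_image_url_from_srcset; infer_instance

-- ===== CLAIM (what is proved, stated in full; the proofs are below) =====
def Claim_equal_get_image_url_from_srcset : Prop := ∀ (srcset : Option String), Dom_get_image_url_from_srcset srcset → Spec_get_image_url_from_srcset srcset (get_image_url_from_srcset srcset)

-- ===== LEMMAS AND PROOFS =====

-- Python's final `BASE_URL + best if best else None`
def pvFinish (o : Option String) : Option String :=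
  match o with
  | some u => if u = "" then none else some (pvBase ++ u)
  | none => none

-- invariant satisfied by every entry that strip+split produces: a 'w' descriptor forces a non-empty url
def pvGood (parts : List String) : Prop :=
  PySem.Chars.endswith ((PySem.List.pyGet? parts (-1)).getD "").toList ['w'] = true →
    (PySem.List.pyGet? parts 0).getD "" ≠ ""

-- the folding step of PySem.List.max? at key (·.1)
def pvMaxStep (acc : Option (Int × String)) (x : Int × String) : Option (Int × String) :=
  match acc with
  | none => some x
  | some m => if m.1 < x.1 then some x else some m

theorem pv_max?_eq_foldl (xs : List (Int × String)) :
    PySem.List.max? xs (fun p => p.1) = xs.foldl pvMaxStep none := by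
  unfold PySem.List.max?
  congr 1
  funext acc x
  cases acc <;> rfl

-- head of a descending stable insert = the max?-fold step
theorem pv_insertBy_head (x : Int × String) (acc : List (Int × String)) :
    (PySem.List.insertBy (fun a b => decide (b.1 < a.1)) x acc).head? =
      pvMaxStep acc.head? x := by
  cases acc with
  | nil => rfl
  | cons y ys =>
    by_cases h : y.1 < x.1
    · simp [PySem.List.insertBy, pvMaxStep, h]
    · simp [PySem.List.insertBy, pvMaxStep, h]

-- head of the whole insertBy fold is the running-max fold
theorem pv_foldl_insertBy_head :
    ∀ (xs : List (Int × String)) (acc : List (Int × String)),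
      (xs.foldl (fun a x => PySem.List.insertBy (fun a b => decide (b.1 < a.1)) x a) acc).head? =
        xs.foldl pvMaxStep acc.head? := by
  intro xs
  induction xs with
  | nil => intro acc; rfl
  | cons x t ih =>
    intro acc
    rw [List.foldl_cons, List.foldl_cons, ih, pv_insertBy_head]

-- the head of Python's sorted(..., reverse=True) is the FIRST maximum, i.e. max? with key
theorem pv_sorted_head (xs : List (Int × String)) :
    (PySem.List.sorted xs (fun p => p.1) true).head? = PySem.List.max? xs (fun p => p.1) := by
  rw [PySem.List.sorted_rev_eq_foldl_insertBy, pv_max?_eq_foldl]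
  exact pv_foldl_insertBy_head xs []

-- width regime: once A holds a positive width and a non-empty url, its loop is exactly max?'s fold
theorem pv_lemma_W :
    ∀ (l : List (List String)) (m : Int) (u : String), 0 < m → u ≠ "" →
      (∀ p ∈ l, pvGood p) →
      ∃ m' u', (l.filterMap pvWidthOf).foldl pvMaxStep (some (m, u)) = some (m', u') ∧
        l.foldl pvStepA (some u, m) = (some u', m') ∧ 0 < m' ∧ u' ≠ "" := by
  intro l
  induction l with
  | nil =>
    intro m u hm hu _
    exact ⟨m, u, rfl, rfl, hm, hu⟩
  | cons p t ih =>
    intro m u hm hu hg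
    have hgp : pvGood p := hg p (by simp)
    have hgt : ∀ q ∈ t, pvGood q := fun q hq => hg q (by simp [hq])
    by_cases hE : PySem.Chars.endswith ((PySem.List.pyGet? p (-1)).getD "").toList ['w'] = true
    · cases hP : PySem.Int.ofStr? (PySem.Str.slice ((PySem.List.pyGet? p (-1)).getD "") none (some (-1))) with
      | none =>
        have hW : pvWidthOf p = none := by simp [pvWidthOf, hE, hP]
        have hA : pvStepA (some u, m) p = (some u, m) := by simp [pvStepA, hE, hP]
        simpa [List.filterMap_cons, hW, hA] using ih m u hm hu hgt
      | some w =>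
        by_cases hlt : m < w
        · have hw0 : (0 : Int) < w := lt_trans hm hlt
          have hW : pvWidthOf p = some (w, (PySem.List.pyGet? p 0).getD "") := by
            simp [pvWidthOf, hE, hP, hw0]
          have hA : pvStepA (some u, m) p = (some ((PySem.List.pyGet? p 0).getD ""), w) := by
            simp [pvStepA, hE, hP, hlt]
          have hurl : (PySem.List.pyGet? p 0).getD "" ≠ "" := hgp hE
          obtain ⟨m', u', h1, h2, h3, h4⟩ := ih w ((PySem.List.pyGet? p 0).getD "") hw0 hurl hgt
          refine ⟨m', u', ?_, ?_, h3, h4⟩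
          · simpa [List.filterMap_cons, hW, pvMaxStep, hlt] using h1
          · simpa [hA] using h2
        · have hA : pvStepA (some u, m) p = (some u, m) := by simp [pvStepA, hE, hP, hlt]
          by_cases hw0 : (0 : Int) < w
          · have hW : pvWidthOf p = some (w, (PySem.List.pyGet? p 0).getD "") := by
              simp [pvWidthOf, hE, hP, hw0]
            obtain ⟨m', u', h1, h2, h3, h4⟩ := ih m u hm hu hgt
            refine ⟨m', u', ?_, ?_, h3, h4⟩
            · simpa [List.filterMap_cons, hW, pvMaxStep, hlt] using h1
            · simpa [hA] using h2
          · have hW : pvWidthOf p = none := by simp [pvWidthOf, hE, hP, hw0]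
            simpa [List.filterMap_cons, hW, hA] using ih m u hm hu hgt
    · simp at hE
      have hW : pvWidthOf p = none := by simp [pvWidthOf, hE]
      have hA : pvStepA (some u, m) p = (some u, m) := by simp [pvStepA, hE, hu]
      simpa [List.filterMap_cons, hW, hA] using ih m u hm hu hgt

-- the heart: A's fold from (b, 0) computes the (max?-candidate, else first fallback) selection
theorem pv_lemma_N :
    ∀ (l : List (List String)) (b : Option String), (∀ p ∈ l, pvGood p) →
      pvFinish (l.foldl pvStepA (b, 0)).1 =
        match PySem.List.max? (l.filterMap pvWidthOf) (fun p => p.1) with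
        | some p => pvFinish (some p.2)
        | none =>
          if b = none ∨ b = some "" then
            pvFinish ((l.find? pvFallback).map (fun parts => (PySem.List.pyGet? parts 0).getD ""))
          else pvFinish b := by
  intro l
  induction l with
  | nil =>
    intro b _
    rcases b with _ | u
    · simp [pvFinish, PySem.List.max?]
    · by_cases hu : u = "" <;> simp [pvFinish, hu, PySem.List.max?]
  | cons p t ih =>
    intro b hg
    have hgp : pvGood p := hg p (by simp)
    have hgt : ∀ q ∈ t, pvGood q := fun q hq => hg q (by simp [hq])
    by_cases hE : PySem.Chars.endswith ((PySem.List.pyGet? p (-1)).getD "").toList ['w'] = true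
    · cases hP : PySem.Int.ofStr? (PySem.Str.slice ((PySem.List.pyGet? p (-1)).getD "") none (some (-1))) with
      | none =>
        have hW : pvWidthOf p = none := by simp [pvWidthOf, hE, hP]
        have hA : pvStepA (b, 0) p = (b, 0) := by simp [pvStepA, hE, hP]
        have hF : pvFallback p = false := by simp [pvFallback, hE]
        simpa [List.filterMap_cons, hW, hA, List.find?_cons, hF] using ih b hgt
      | some w =>
        by_cases hw0 : (0 : Int) < w
        · -- A takes this entry and enters the width regime; B's candidate list starts with it
          have hurl : (PySem.List.pyGet? p 0).getD "" ≠ "" := hgp hE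
          have hA : pvStepA (b, 0) p = (some ((PySem.List.pyGet? p 0).getD ""), w) := by
            simp [pvStepA, hE, hP, hw0]
          have hW : pvWidthOf p = some (w, (PySem.List.pyGet? p 0).getD "") := by
            simp [pvWidthOf, hE, hP, hw0]
          obtain ⟨m', u', h1, h2, _, _⟩ := pv_lemma_W t w ((PySem.List.pyGet? p 0).getD "") hw0 hurl hgt
          have hmax : PySem.List.max? ((p :: t).filterMap pvWidthOf) (fun q => q.1) = some (m', u') := by
            rw [pv_max?_eq_foldl]
            simpa [List.filterMap_cons, hW, pvMaxStep] using h1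
          rw [hmax]
          simp only [List.foldl_cons, hA, h2]
        · have hA : pvStepA (b, 0) p = (b, 0) := by simp [pvStepA, hE, hP, hw0]
          have hW : pvWidthOf p = none := by simp [pvWidthOf, hE, hP, hw0]
          have hF : pvFallback p = false := by simp [pvFallback, hE]
          simpa [List.filterMap_cons, hW, hA, List.find?_cons, hF] using ih b hgt
    · -- non-width entry: A's fallback branch
      simp at hE
      have hW : pvWidthOf p = none := by simp [pvWidthOf, hE]
      by_cases hb : b = none ∨ b = some ""
      · have hA : pvStepA (b, 0) p = (some ((PySem.List.pyGet? p 0).getD ""), 0) := by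
          simp [pvStepA, hE, hb]
        by_cases hu : (PySem.List.pyGet? p 0).getD "" = ""
        · have hF : pvFallback p = false := by simp [pvFallback, hE, hu]
          rw [List.foldl_cons, hA, ih (some ((PySem.List.pyGet? p 0).getD "")) hgt]
          simp [hW, hF, hb, hu]
        · have hF : pvFallback p = true := by simp [pvFallback, hE, hu]
          rw [List.foldl_cons, hA, ih (some ((PySem.List.pyGet? p 0).getD "")) hgt]
          simp [hW, hF, hb, hu, pvFinish]
      · have hA : pvStepA (b, 0) p = (b, 0) := by simp [pvStepA, hE, hb]
        rw [List.foldl_cons, hA, ih b hgt]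
        simp [hW, hb]

-- ---- string-side facts: every entry produced by strip+split satisfies pvGood ----

theorem pv_go_space :
    ∀ (fuel : Nat) (l cur : List Char) (acc : List (List Char)), l.length < fuel →
      ∃ tl, PySem.Chars.splitOn.go [' '] fuel l cur acc =
        acc.reverse ++ (cur.reverse ++ l.takeWhile (fun c => !(c == ' '))) :: tl := by
  intro fuel
  induction fuel with
  | zero => intro l cur acc h; omega
  | succ fuel ih =>
    intro l cur acc h
    cases l with
    | nil =>
      refine ⟨[], ?_⟩
      rw [PySem.Chars.splitOn.go.eq_def]
      simp
    | cons c rest =>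
      by_cases hc : c = ' '
      · obtain ⟨tl', htl'⟩ := ih rest [] (cur.reverse :: acc) (by simpa using Nat.lt_of_succ_lt_succ h)
        refine ⟨rest.takeWhile (fun c => !(c == ' ')) :: tl', ?_⟩
        rw [PySem.Chars.splitOn.go.eq_def]
        simp [hc, List.isPrefixOf, htl']
      · obtain ⟨tl', htl'⟩ := ih rest (c :: cur) acc (by simpa using Nat.lt_of_succ_lt_succ h)
        refine ⟨tl', ?_⟩
        rw [PySem.Chars.splitOn.go.eq_def]
        simp [List.isPrefixOf, Ne.symm hc, hc, htl']

theorem pv_splitOn_space (cs : List Char) :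
    ∃ tl, PySem.Chars.splitOn cs [' '] = (cs.takeWhile (fun c => !(c == ' '))) :: tl := by
  obtain ⟨tl, htl⟩ := pv_go_space (cs.length + 1) cs [] [] (Nat.lt_succ_self _)
  exact ⟨tl, by simpa [PySem.Chars.splitOn] using htl⟩

theorem pv_dropWhile_head {p : Char → Bool} :
    ∀ (l : List Char) {c : Char} {r : List Char}, l.dropWhile p = c :: r → p c = false := by
  intro l
  induction l with
  | nil => intro c r h; simp [List.dropWhile] at h
  | cons a t ih =>
    intro c r h
    by_cases ha : p a = true
    · exact ih (by simpa [List.dropWhile, ha] using h)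
    · rw [List.dropWhile_cons_of_neg (by simpa using ha)] at h
      cases h
      simpa using ha

theorem pv_strip_head {cs : List Char} {c : Char} {r : List Char}
    (h : PySem.Chars.strip cs = c :: r) : PySem.Chars.isspace c = false := by
  unfold PySem.Chars.strip PySem.Chars.rstrip at h
  have h2 : List.dropWhile PySem.Chars.isspace (PySem.Chars.lstrip cs).reverse
      = r.reverse ++ [c] := by
    have := congrArg List.reverse h
    simpa using this
  obtain ⟨pre, hpre⟩ := List.dropWhile_suffix (l := (PySem.Chars.lstrip cs).reverse)
    (p := PySem.Chars.isspace)
  rw [h2] at hpre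
  have hl : List.dropWhile PySem.Chars.isspace cs = c :: (r ++ pre.reverse) := by
    have := congrArg List.reverse hpre
    simpa [PySem.Chars.lstrip] using this.symm
  exact pv_dropWhile_head cs hl

theorem pv_good_entry (e : String) :
    pvGood ((PySem.Str.split? (PySem.Str.strip e) " ").getD []) := by
  have hparts : ((PySem.Str.split? (PySem.Str.strip e) " ").getD []) =
      (PySem.Chars.splitOn (PySem.Chars.strip e.toList) [' ']).map String.ofList := by
    simp [PySem.Str.split?, PySem.Chars.split?]
  rw [hparts]
  cases h : PySem.Chars.strip e.toList with
  | nil =>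
    unfold pvGood
    decide
  | cons c r =>
    have hsp := pv_splitOn_space (c :: r)
    obtain ⟨tl, htl⟩ := hsp
    have hc : (c == ' ') = false := by
      have hs := pv_strip_head h
      by_cases hce : c = ' '
      · rw [hce] at hs; exact absurd hs (by decide)
      · simpa using hce
    rw [htl]
    intro _
    have htw : (c :: r).takeWhile (fun c => !(c == ' ')) = c :: r.takeWhile (fun c => !(c == ' ')) := by
      simp [hc]
    rw [htw]
    simp [PySem.List.pyGet?, PySem.List.pyIdx?]

-- ===== VERDICT (by name: the statement is the Claim_ definition above) =====
theorem get_image_url_from_srcset_spec : Claim_equal_get_image_url_from_srcset := by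
  intro srcset _
  unfold Spec_get_image_url_from_srcset
  cases srcset with
  | none => rfl
  | some s =>
    by_cases hs : s = ""
    · simp [get_image_url_from_srcset, get_image_url_from_srcset_alt, hs]
    · set E := ((PySem.Str.split? s ",").getD []).map
          (fun e => (PySem.Str.split? (PySem.Str.strip e) " ").getD []) with hEdef
      have hQ : ∀ p ∈ E, pvGood p := by
        intro p hp
        rw [hEdef] at hp
        obtain ⟨e, _, rfl⟩ := List.mem_map.mp hp
        exact pv_good_entry e
      have hN := pv_lemma_N E none hQ
      have e1 : get_image_url_from_srcset (some s) = pvFinish ((E.foldl pvStepA (none, 0)).1) := by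
        simp only [get_image_url_from_srcset, if_neg hs]
        rfl
      have hhead := pv_sorted_head (E.filterMap pvWidthOf)
      have e2 : get_image_url_from_srcset_alt (some s) =
          (match PySem.List.max? (E.filterMap pvWidthOf) (fun p => p.1) with
           | some p => pvFinish (some p.2)
           | none => pvFinish ((E.find? pvFallback).map
               (fun parts => (PySem.List.pyGet? parts 0).getD ""))) := by
        simp only [get_image_url_from_srcset_alt, if_neg hs]
        cases hr : PySem.List.sorted (E.filterMap pvWidthOf) (fun p => p.1) true with
        | nil =>
          rw [hr] at hhead
          rw [← hhead]
          rfl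
        | cons p tl =>
          rw [hr] at hhead
          rw [← hhead]
          rfl
      rw [e1, e2, hN]
      cases PySem.List.max? (E.filterMap pvWidthOf) (fun p => p.1) with
      | none => simp
      | some p => rfl
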